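-- pv_equiv track=rewrite | github.com/COSC-499-W2025/capstone-project-team-1 | src/artifactminer/resume/extractors/imports.py | _find_circular_deps
-- ===== SOURCE A (Python) =====
-- from typing import Dict, List, Optional, Set
--
-- def _find_circular_deps(imports_map: Dict[str, List[str]]) -> List[tuple]:
--     """Find circular dependencies using DFS."""
--     cycles: List[tuple] = []
--     visited: Set[str] = set()
--
--     def _dfs(node: str, path: List[str], path_set: Set[str]) -> None:
--         if node in path_set:
--             # Found a cycle
--             cycle_start = path.index(node)
--             cycle = tuple(path[cycle_start:] + [node])
--             if cycle not in cycles: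
--                 cycles.append(cycle)
--             return
--         if node in visited:
--             return
--
--         path.append(node)
--         path_set.add(node)
--
--         for dep in imports_map.get(node, []):
--             if dep in imports_map:  # Only follow internal deps
--                 _dfs(dep, path, path_set)
--
--         path.pop()
--         path_set.discard(node)
--         visited.add(node)
--
--     for module in imports_map:
--         visited.clear()
--         _dfs(module, [], set())
--
--     return cycles[:10]  # Limit to 10
-- ===== SOURCE B (Python) =====
-- def _find_circular_deps(imports_map):
--     """Find circular dependencies with an explicit-stack (iterative) DFS."""
--     cycles = []
--     for module in imports_map:
--         visited = set()
--         path = []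
--         path_set = set()
--         stack = [("enter", module)]
--         while stack:
--             tag, node = stack.pop()
--             if tag == "enter":
--                 if node in path_set:
--                     cycle_start = path.index(node)
--                     cycle = tuple(path[cycle_start:] + [node])
--                     if cycle not in cycles:
--                         cycles.append(cycle)
--                 elif node in visited:
--                     pass
--                 else:
--                     path.append(node)
--                     path_set.add(node)
--                     stack.append(("exit", node))
--                     for dep in reversed(imports_map.get(node, [])):
--                         if dep in imports_map:  # Only follow internal deps
--                             stack.append(("enter", dep))
--             else:
--                 path.pop()
--                 path_set.discard(node)
--                 visited.add(node)
--     return cycles[:10]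
-- ===== Notes on version B (the rewrite author's own statement) =====
-- stated objective: alternative
-- what changed: The recursive nested-function _dfs is replaced by an explicit iterative DFS over a stack of ('enter'/'exit') work items, pushing internal deps in reverse so they pop in order and marking visited/popping the path on the 'exit' item.
import Mathlib
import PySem

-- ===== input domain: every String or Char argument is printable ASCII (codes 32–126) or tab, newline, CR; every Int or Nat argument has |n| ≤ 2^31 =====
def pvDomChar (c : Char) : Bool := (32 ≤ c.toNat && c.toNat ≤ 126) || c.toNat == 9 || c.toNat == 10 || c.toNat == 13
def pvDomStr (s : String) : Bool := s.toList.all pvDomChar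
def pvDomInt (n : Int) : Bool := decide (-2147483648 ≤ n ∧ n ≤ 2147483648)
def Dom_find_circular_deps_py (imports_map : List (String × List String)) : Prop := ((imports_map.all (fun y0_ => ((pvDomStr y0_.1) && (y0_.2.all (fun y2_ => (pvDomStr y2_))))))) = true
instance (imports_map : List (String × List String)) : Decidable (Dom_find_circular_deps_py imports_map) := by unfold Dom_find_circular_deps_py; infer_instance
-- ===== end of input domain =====

-- B replaces A's recursive nested-function DFS by an explicit iterative DFS over a stack of
-- enter/exit work items (objective: alternative decomposition, same asymptotic cost).

-- Shared modelling of the input dict (assoc list, first-match lookup — exact for Python's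
-- `imports_map.get(node, [])` and `dep in imports_map`) and of the threaded state
-- (the `cycles` list, the `visited` and `path_set` sets, the `path` list).
def pvHasKey (m : List (String × List String)) (k : String) : Bool :=
  m.any (fun p => p.1 == k)

def pvGetDeps (m : List (String × List String)) (k : String) : List String :=
  ((m.find? (fun p => p.1 == k)).map Prod.snd).getD []

structure DfsSt where
  cycles  : List (List String)
  visited : PySem.Set String
  path    : List String
  pathSet : PySem.Set String

-- ===== PORT A =====
-- A's nested `_dfs` (the recursion) and its `for dep in …` loop, as mutual recursion; the Nat
-- fuel is a totality guard only — A is always called with fuel imports_map.length + 1, which the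
-- recursion (whose depth is bounded by the number of distinct keys on the path) never exhausts.
mutual
def dfsA (m : List (String × List String)) (fuel : Nat) (node : String) (s : DfsSt) : DfsSt :=
  match fuel with
  | 0 => s
  | f + 1 =>
    if node ∈ s.pathSet then
      -- Found a cycle (node ∈ path_set ⇒ node ∈ path, so `.getD 0` is never the default)
      let cycleStart := (PySem.List.index? s.path node).getD 0
      let cycle := s.path.drop cycleStart ++ [node]
      { s with cycles := if cycle ∈ s.cycles then s.cycles else s.cycles ++ [cycle] }
    else if node ∈ s.visited then s
    else
      let s1 : DfsSt := { s with path := s.path ++ [node], pathSet := s.pathSet.add node }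
      let s2 := depsA m f (pvGetDeps m node) s1
      { s2 with path := s2.path.dropLast, pathSet := s2.pathSet.discard node,
                visited := s2.visited.add node }
termination_by (fuel, 0)

def depsA (m : List (String × List String)) (fuel : Nat) (deps : List String) (s : DfsSt) : DfsSt :=
  match deps with
  | [] => s
  | dep :: rest =>
    depsA m fuel rest (if pvHasKey m dep then dfsA m fuel dep s else s)
termination_by (fuel, deps.length + 1)
end

def find_circular_deps_py (imports_map : List (String × List String)) : List (List String) :=
  (imports_map.foldl
    (fun cycles p =>
      (dfsA imports_map (imports_map.length + 1) p.1
        ⟨cycles, PySem.Set.empty, [], PySem.Set.empty⟩).cycles)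
    []).take 10

-- ===== PORT B =====
-- Measure helpers for the iterative loop's termination (proof bookkeeping only): the number of
-- keys not yet in visited ∪ path_set, and a weight of the pending work items.
def pvCnt (m : List (String × List String)) (vis ps : PySem.Set String) : Nat :=
  ((m.map Prod.fst).filter (fun k => !(decide (k ∈ vis) || decide (k ∈ ps)))).length

def pvWeight (stack : List (Bool × String)) : Nat :=
  (stack.map (fun it => if it.1 then 2 else 1)).sum

theorem pv_len_filter_lt {α : Type} (l : List α) (P Q : α → Bool)
    (h : ∀ a, P a = true → Q a = true) (x : α) (hx : x ∈ l)
    (hQ : Q x = true) (hP : P x = false) :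
    (l.filter P).length < (l.filter Q).length := by
  induction l with
  | nil => cases hx
  | cons a t ih =>
    rcases List.mem_cons.mp hx with rfl | hxt
    · have hle := (List.monotone_filter_right t h).length_le
      simp [hQ, hP]
      omega
    · have h1 := ih hxt
      by_cases hPa : P a = true
      · have hQa := h a hPa
        simp [hPa, hQa]
        omega
      · simp only [Bool.not_eq_true] at hPa
        by_cases hQa : Q a = true
        · simp [hPa, hQa]
          omega
        · simp only [Bool.not_eq_true] at hQa
          simp [hPa, hQa]
          omega

theorem pv_cnt_mono (m : List (String × List String)) (vis ps vis' ps' : PySem.Set String)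
    (h : ∀ k, (k ∉ vis' ∧ k ∉ ps') → (k ∉ vis ∧ k ∉ ps)) :
    pvCnt m vis' ps' ≤ pvCnt m vis ps := by
  unfold pvCnt
  refine (List.monotone_filter_right _ ?_).length_le
  intro a ha
  simp only [Bool.not_eq_true', Bool.or_eq_false_iff, decide_eq_false_iff_not] at ha ⊢
  exact h a ha

theorem pv_cnt_add_lt (m : List (String × List String)) (vis ps : PySem.Set String)
    (node : String) (hk : pvHasKey m node = true) (hv : node ∉ vis) (hps : node ∉ ps) :
    pvCnt m vis (ps.add node) < pvCnt m vis ps := by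
  unfold pvCnt
  refine pv_len_filter_lt _ _ _ ?_ node ?_ ?_ ?_
  · intro a ha
    simp only [Bool.not_eq_true', Bool.or_eq_false_iff, decide_eq_false_iff_not,
      PySem.Set.mem_add] at ha ⊢
    exact ⟨ha.1, fun hmem => ha.2 (Or.inl hmem)⟩
  · simp only [List.mem_map]
    rcases List.any_eq_true.mp hk with ⟨p, hp, hpk⟩
    exact ⟨p, hp, by simpa using hpk⟩
  · simp [hv, hps]
  · simp [PySem.Set.mem_add]

-- B's `while stack:` loop; the list's head is the stack's top; `true` = "enter", `false` = "exit".
def runB (m : List (String × List String)) (stack : List (Bool × String)) (s : DfsSt) : DfsSt :=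
  match stack with
  | [] => s
  | (tag, node) :: rest =>
    if tag then
      if hps : node ∈ s.pathSet then
        let cycleStart := (PySem.List.index? s.path node).getD 0
        let cycle := s.path.drop cycleStart ++ [node]
        runB m rest { s with cycles := if cycle ∈ s.cycles then s.cycles else s.cycles ++ [cycle] }
      else if hv : node ∈ s.visited then
        runB m rest s
      else
        -- push the exit marker, then the internal deps in reverse so they pop left-to-right:
        -- with the head as top of stack that is the "enter"s of the filtered deps, then the marker
        runB m (((pvGetDeps m node).filter (pvHasKey m)).map (fun d => (true, d)) ++ (false, node) :: rest)
          { s with path := s.path ++ [node], pathSet := s.pathSet.add node }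
    else
      runB m rest
        { s with path := s.path.dropLast, pathSet := s.pathSet.discard node,
                 visited := s.visited.add node }
termination_by (pvCnt m s.visited s.pathSet, pvWeight stack)
decreasing_by
  · apply Prod.Lex.right
    simp_all [pvWeight]
  · apply Prod.Lex.right
    simp_all [pvWeight]
  · by_cases hk : pvHasKey m node = true
    · exact Prod.Lex.left _ _ (pv_cnt_add_lt m s.visited s.pathSet node hk hv hps)
    · -- node is no key: no deps are pushed and the path_set did not lose any key
      have hle : pvCnt m s.visited (s.pathSet.add node) ≤ pvCnt m s.visited s.pathSet := by
        refine pv_cnt_mono m _ _ _ _ ?_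
        intro k hk'
        exact ⟨hk'.1, fun hmem => hk'.2 (PySem.Set.mem_add _ _ _ |>.mpr (Or.inl hmem))⟩
      rcases Nat.lt_or_eq_of_le hle with hlt | heq
      · exact Prod.Lex.left _ _ hlt
      · have hdeps : pvGetDeps m node = [] := by
          unfold pvGetDeps
          rw [List.find?_eq_none.mpr]
          · rfl
          · intro p hp
            simp only [Bool.not_eq_true]
            exact (Bool.not_eq_true _).mp
              (fun hpe => hk (List.any_eq_true.mpr ⟨p, hp, hpe⟩))
        rw [heq]
        apply Prod.Lex.right
        simp_all [pvWeight]
  · have hle : pvCnt m (s.visited.add node) (s.pathSet.discard node)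
        ≤ pvCnt m s.visited s.pathSet := by
      refine pv_cnt_mono m _ _ _ _ ?_
      intro k hk'
      refine ⟨fun hmem => hk'.1 (PySem.Set.mem_add _ _ _ |>.mpr (Or.inl hmem)), fun hmem => ?_⟩
      by_cases hkn : k = node
      · exact hk'.1 (PySem.Set.mem_add _ _ _ |>.mpr (Or.inr hkn))
      · exact hk'.2 (PySem.Set.mem_discard _ _ _ |>.mpr ⟨hmem, hkn⟩)
    rcases Nat.lt_or_eq_of_le hle with hlt | heq
    · exact Prod.Lex.left _ _ hlt
    · rw [heq]
      apply Prod.Lex.right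
      simp_all [pvWeight]

def find_circular_deps_py_alt (imports_map : List (String × List String)) : List (List String) :=
  (imports_map.foldl
    (fun cycles p =>
      (runB imports_map [(true, p.1)]
        ⟨cycles, PySem.Set.empty, [], PySem.Set.empty⟩).cycles)
    []).take 10

-- ===== PRECONDITION & SPEC =====
def Spec_find_circular_deps_py (imports_map : List (String × List String)) (out : List (List String)) : Prop := out = find_circular_deps_py_alt imports_map
instance (imports_map : List (String × List String)) (out : List (List String)) : Decidable (Spec_find_circular_deps_py imports_map out) := by unfold Spec_find_circular_deps_py; infer_instance

-- ===== CLAIM (what is proved, stated in full; the proofs are below) =====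
def Claim_equal_find_circular_deps_py : Prop := ∀ (imports_map : List (String × List String)), Dom_find_circular_deps_py imports_map → Spec_find_circular_deps_py imports_map (find_circular_deps_py imports_map)

-- ===== LEMMAS AND PROOFS =====

-- "s' is s after a completed _dfs call": path and path_set restored exactly, visited only grew
def PvPres (s' s : DfsSt) : Prop :=
  s'.path = s.path ∧ s'.pathSet = s.pathSet ∧ ∀ x, x ∈ s.visited → x ∈ s'.visited

theorem pvPres_trans {s3 s2 s1 : DfsSt} (h2 : PvPres s3 s2) (h1 : PvPres s2 s1) : PvPres s3 s1 :=
  ⟨h2.1.trans h1.1, h2.2.1.trans h1.2.1, fun x hx => h2.2.2 x (h1.2.2 x hx)⟩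

theorem pv_discard_add (s : PySem.Set String) (x : String) (hx : x ∉ s) :
    (s.add x).discard x = s := by
  have hc : s.contains x = false := by
    simp only [PySem.Set.contains]
    exact (Bool.not_eq_true _).mp (fun h => hx (List.contains_iff_mem.mp h))
  simp only [PySem.Set.add, hc, Bool.false_eq_true, if_false, PySem.Set.discard,
    List.filter_append, List.filter_cons, beq_self_eq_true, Bool.not_true, List.filter_nil]
  simp only [List.append_nil]
  exact List.filter_eq_self.mpr (by intro y hy; simp; rintro rfl; exact hx hy)

theorem pres_deps (m : List (String × List String)) (fuel : Nat)
    (hf : ∀ node s, PvPres (dfsA m fuel node s) s) :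
    ∀ deps s, PvPres (depsA m fuel deps s) s := by
  intro deps
  induction deps with
  | nil => intro s; rw [depsA]; exact ⟨rfl, rfl, fun _ h => h⟩
  | cons d rest ih =>
    intro s
    rw [depsA]
    by_cases hk : pvHasKey m d = true
    · simp only [hk, if_true]
      exact pvPres_trans (ih (dfsA m fuel d s)) (hf d s)
    · simp only [hk]
      exact ih s

theorem pres_dfs (m : List (String × List String)) :
    ∀ fuel node s, PvPres (dfsA m fuel node s) s := by
  intro fuel
  induction fuel with
  | zero => intro node s; rw [dfsA]; exact ⟨rfl, rfl, fun _ h => h⟩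
  | succ f ih =>
    intro node s
    rw [dfsA]
    by_cases hps : node ∈ s.pathSet
    · simp only [hps, if_true]
      exact ⟨rfl, rfl, fun _ h => h⟩
    · simp only [hps, if_false]
      by_cases hv : node ∈ s.visited
      · simp only [hv, if_true]
        exact ⟨rfl, rfl, fun _ h => h⟩
      · simp only [hv, if_false]
        have hp := pres_deps m f ih (pvGetDeps m node)
          ⟨s.cycles, s.visited, s.path ++ [node], s.pathSet.add node⟩
        refine ⟨?_, ?_, ?_⟩
        · simp only [hp.1]
          exact List.dropLast_concat
        · simp only [hp.2.1]
          exact pv_discard_add s.pathSet node hps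
        · intro x hx
          exact PySem.Set.mem_add _ _ _ |>.mpr (Or.inl (hp.2.2 x hx))

theorem pv_cnt_le_of_pres (m : List (String × List String)) {s' s : DfsSt} (h : PvPres s' s) :
    pvCnt m s'.visited s'.pathSet ≤ pvCnt m s.visited s.pathSet := by
  rw [h.2.1]
  refine pv_cnt_mono m _ _ _ _ ?_
  intro k hk
  exact ⟨fun hmem => hk.1 (h.2.2 k hmem), hk.2⟩

-- the bridge: one "enter" item of B's stack behaves like one call of A's `_dfs`
theorem pv_bridge (m : List (String × List String)) :
    ∀ (fuel : Nat) (node : String) (rest : List (Bool × String)) (s : DfsSt),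
      pvHasKey m node = true → pvCnt m s.visited s.pathSet < fuel →
      runB m ((true, node) :: rest) s = runB m rest (dfsA m fuel node s) := by
  intro fuel
  induction fuel with
  | zero => intro node rest s _ hcnt; omega
  | succ f ih =>
    have bridge_deps : ∀ (deps : List String) (rest : List (Bool × String)) (s : DfsSt),
        pvCnt m s.visited s.pathSet < f →
        runB m ((deps.filter (pvHasKey m)).map (fun d => (true, d)) ++ rest) s
          = runB m rest (depsA m f deps s) := by
      intro deps
      induction deps with
      | nil => intro rest s _; rw [depsA]; rfl
      | cons d ds ihd =>
        intro rest s hcnt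
        rw [depsA]
        by_cases hk : pvHasKey m d = true
        · simp only [List.filter_cons, hk, if_true, List.map_cons, List.cons_append]
          rw [ih d _ s hk (by omega)]
          have hcnt' : pvCnt m (dfsA m f d s).visited (dfsA m f d s).pathSet
              < f := lt_of_le_of_lt (pv_cnt_le_of_pres m (pres_dfs m f d s)) hcnt
          rw [ihd rest (dfsA m f d s) hcnt']
        · rw [Bool.not_eq_true] at hk
          simp only [List.filter_cons, hk, Bool.false_eq_true, if_false]
          rw [ihd rest s hcnt]
    intro node rest s hk hcnt
    rw [dfsA, runB]
    by_cases hps : node ∈ s.pathSet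
    · simp [hps]
    · by_cases hv : node ∈ s.visited
      · simp [hps, hv]
      · simp only [hps, hv, dite_eq_ite, if_true]
        have hcnt1 : pvCnt m s.visited (s.pathSet.add node) < f := by
          have := pv_cnt_add_lt m s.visited s.pathSet node hk hv hps
          omega
        rw [bridge_deps (pvGetDeps m node) ((false, node) :: rest)
          ⟨s.cycles, s.visited, s.path ++ [node], s.pathSet.add node⟩ hcnt1]
        rw [runB]
        simp only [Bool.false_eq_true, if_false]

-- ===== VERDICT (by name: the statement is the Claim_ definition above) =====
theorem find_circular_deps_py_spec : Claim_equal_find_circular_deps_py := by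
  intro m _
  unfold Spec_find_circular_deps_py find_circular_deps_py find_circular_deps_py_alt
  congr 1
  refine PySem.List.foldl_congr_mem m _ _ [] ?_
  intro cycles p hp
  have hk : pvHasKey m p.1 = true :=
    List.any_eq_true.mpr ⟨p, hp, by simp⟩
  have hcnt : pvCnt m PySem.Set.empty PySem.Set.empty < m.length + 1 := by
    have h1 : pvCnt m PySem.Set.empty PySem.Set.empty ≤ (m.map Prod.fst).length :=
      List.length_filter_le _ _
    simp only [List.length_map] at h1
    omega
  rw [pv_bridge m (m.length + 1) p.1 []
    ⟨cycles, PySem.Set.empty, [], PySem.Set.empty⟩ hk hcnt]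
  rw [runB]
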